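-- pv_equiv track=rewrite | github.com/Ed290901/ProyectoICC | Mapadecoordenadas.py | crear_cuadro
-- ===== SOURCE A (Python) =====
-- def crear_cuadro(filas,columnas,cuadro):
--     for i in range(filas):
--         row = []
--         for j in range(columnas):
--             if j == 0 or i == 0 or i == filas - 1 or j == columnas - 1:
--                 row.append(".")
--             else:
--                 row.append(" ")
--         cuadro.append(row)
--     return cuadro
-- ===== SOURCE B (Python) =====
-- def crear_cuadro(filas, columnas, cuadro):
--     for i in range(filas):
--         if i == 0 or i == filas - 1 or columnas < 2:
--             cuadro.append(["."] * columnas)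
--         else:
--             cuadro.append(["."] + [" "] * (columnas - 2) + ["."])
--     return cuadro
-- ===== Notes on version B (the rewrite author's own statement) =====
-- stated objective: simpler
-- what changed: Replaces the per-cell 4-way conditional inner loop with per-row dispatch: border (or width<2) rows are built as ['.']*columnas and interior rows as ['.']+[' ']*(columnas-2)+['.'], removing the inner loop entirely.
import Mathlib
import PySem

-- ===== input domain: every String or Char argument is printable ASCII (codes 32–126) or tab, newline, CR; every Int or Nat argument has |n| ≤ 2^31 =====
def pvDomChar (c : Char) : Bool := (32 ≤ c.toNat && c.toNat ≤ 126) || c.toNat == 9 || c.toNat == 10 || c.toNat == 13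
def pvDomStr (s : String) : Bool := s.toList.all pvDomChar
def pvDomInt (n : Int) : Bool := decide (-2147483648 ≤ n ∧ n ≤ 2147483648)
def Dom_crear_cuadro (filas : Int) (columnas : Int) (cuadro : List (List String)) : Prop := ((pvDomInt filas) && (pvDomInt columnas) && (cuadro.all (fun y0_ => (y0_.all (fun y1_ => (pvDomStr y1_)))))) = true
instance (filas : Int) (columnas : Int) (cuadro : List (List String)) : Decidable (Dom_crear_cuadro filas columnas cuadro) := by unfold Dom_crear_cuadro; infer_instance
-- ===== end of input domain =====

-- B builds each row at once (border rows as a full run of ".", interior rows as "." ++ blanks ++ ".")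
-- instead of A's per-cell 4-way conditional; objective: simpler (no inner per-cell loop).
-- A mutates `cuadro` in place (appends rows); the equivalence proved here is about the return value.

-- ===== PORT A =====
def crear_cuadro (filas : Int) (columnas : Int) (cuadro : List (List String)) : List (List String) :=
  (PySem.List.pyRange 0 filas 1).foldl (fun cu i =>
    cu ++ [(PySem.List.pyRange 0 columnas 1).foldl (fun row j =>
      row ++ [if j == 0 || i == 0 || i == filas - 1 || j == columnas - 1 then "." else " "]) []]) cuadro

-- ===== PORT B =====
def crear_cuadro_alt (filas : Int) (columnas : Int) (cuadro : List (List String)) : List (List String) :=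
  (PySem.List.pyRange 0 filas 1).foldl (fun cu i =>
    if i == 0 || i == filas - 1 || columnas < 2 then
      cu ++ [List.replicate columnas.toNat "."]
    else
      cu ++ [["."] ++ List.replicate (columnas - 2).toNat " " ++ ["."]]) cuadro

-- ===== PRECONDITION & SPEC =====
def Spec_crear_cuadro (filas : Int) (columnas : Int) (cuadro : List (List String)) (out : List (List String)) : Prop := out = crear_cuadro_alt filas columnas cuadro
instance (filas : Int) (columnas : Int) (cuadro : List (List String)) (out : List (List String)) : Decidable (Spec_crear_cuadro filas columnas cuadro out) := by unfold Spec_crear_cuadro; infer_instance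

-- ===== CLAIM (what is proved, stated in full; the proofs are below) =====
def Claim_equal_crear_cuadro : Prop := ∀ (filas : Int) (columnas : Int) (cuadro : List (List String)), Dom_crear_cuadro filas columnas cuadro → Spec_crear_cuadro filas columnas cuadro (crear_cuadro filas columnas cuadro)

-- ===== LEMMAS AND PROOFS =====

-- a constant-valued map over `range` is a replicate
lemma map_range_const_dot (n : Nat) (p : Nat → Bool) (h : ∀ k < n, p k = true) :
    (List.range n).map (fun k => if p k then "." else " ") = List.replicate n "." := by
  rw [List.eq_replicate_iff]
  refine ⟨by simp, ?_⟩
  intro b hb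
  simp only [List.mem_map, List.mem_range] at hb
  obtain ⟨k, hk, rfl⟩ := hb
  simp [h k hk]

-- the interior row of width m+2: a dot, m blanks, a dot
lemma map_range_interior (m : Nat) :
    (List.range (m + 2)).map (fun k => if k == 0 || k == m + 1 then "." else " ")
      = ["."] ++ List.replicate m " " ++ ["."] := by
  apply List.ext_getElem
  · simp
  · intro k h1 h2
    simp only [List.length_map, List.length_range] at h1
    simp only [List.getElem_map, List.getElem_range]
    by_cases hk0 : k = 0
    · subst hk0; simp
    · by_cases hkm : k = m + 1
      · subst hkm
        simp
      · have h4 : k - 1 < m := by omega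
        have h5 : k < m + 1 := by omega
        simp [hk0, hkm, List.getElem_cons, h4]

-- A's inner loop produces exactly B's row
lemma row_eq (filas columnas i : Int) :
    (PySem.List.pyRange 0 columnas 1).foldl (fun row j =>
        row ++ [if j == 0 || i == 0 || i == filas - 1 || j == columnas - 1 then "." else " "]) []
      = (if i == 0 || i == filas - 1 || columnas < 2 then
          List.replicate columnas.toNat "."
        else ["."] ++ List.replicate (columnas - 2).toNat " " ++ ["."]) := by
  rw [PySem.List.foldl_append_singleton_eq_map, List.nil_append, PySem.List.pyRange_one]
  rw [List.map_map]
  by_cases hb : (i == 0 || i == filas - 1) = true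
  · -- border row: every cell is "."
    have hb2 : (i == 0 || i == filas - 1 || decide (columnas < 2)) = true := by
      simp only [Bool.or_eq_true] at hb ⊢; tauto
    simp only [Function.comp_def, Int.sub_zero, hb2, if_pos]
    rw [map_range_const_dot]
    intro k hk
    simp only [Bool.or_eq_true] at hb ⊢
    tauto
  · -- interior row
    have h0 : (i == 0) = false := by
      simp only [Bool.or_eq_true, beq_iff_eq] at hb; simp only [beq_eq_false_iff_ne, ne_eq]; tauto
    have h1 : (i == filas - 1) = false := by
      simp only [Bool.or_eq_true, beq_iff_eq] at hb; simp only [beq_eq_false_iff_ne, ne_eq]; tauto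
    simp only [Function.comp_def, Int.sub_zero, h0, h1, Bool.or_false, Bool.false_or]
    by_cases hc : columnas < 2
    · simp only [hc, decide_true, if_pos]
      have : columnas.toNat = 0 ∨ columnas.toNat = 1 := by omega
      rcases this with h | h <;> rw [h]
      · have : columnas ≤ 0 := by omega
        simp [List.range_zero]
      · have hc1 : columnas = 1 := by omega
        subst hc1
        simp [List.range_succ]
    · simp only [hc, decide_false]
      have hm : columnas.toNat = (columnas - 2).toNat + 2 := by omega
      rw [hm]
      rw [List.map_congr_left (g := fun k : Nat =>
            if (k == 0 || k == (columnas - 2).toNat + 1) = true then "." else " ") ?_]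
      · exact map_range_interior (columnas - 2).toNat
      · intro k hk
        simp only [List.mem_range] at hk
        refine if_congr ?_ rfl rfl
        simp only [Bool.or_eq_true, beq_iff_eq]
        omega

-- ===== VERDICT (by name: the statement is the Claim_ definition above) =====
theorem crear_cuadro_spec : Claim_equal_crear_cuadro := by
  intro filas columnas cuadro _
  unfold Spec_crear_cuadro crear_cuadro crear_cuadro_alt
  apply PySem.List.foldl_congr_mem
  intro cu i _
  rw [row_eq]
  split <;> rfl
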